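-- pv_equiv track=rewrite | github.com/alexcosta13/advent-of-code-2020 | day04.py | is_hex_color
-- ===== SOURCE A (Python) =====
-- def is_hex_color(value):
--     valid = [
--         "0",
--         "1",
--         "2",
--         "3",
--         "4",
--         "5",
--         "6",
--         "7",
--         "8",
--         "9",
--         "a",
--         "b",
--         "c",
--         "d",
--         "e",
--         "f",
--     ]
--     if len(value) != 7:
--         return False
--     if value[0] != "#":
--         return False
--     for v in value[1:]:
--         if not (v in valid):
--             return False
--     return True
-- ===== SOURCE B (Python) =====
-- import re
--
-- _HEX_RE = re.compile(r"#[0-9a-f]{6}")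
--
-- def is_hex_color(value):
--     return bool(_HEX_RE.fullmatch(value))
-- ===== Notes on version B (the rewrite author's own statement) =====
-- stated objective: idiomatic
-- what changed: Replaces the explicit length guard, prefix check and per-character membership loop over a 16-element list with a single compiled-regex full-string match.
import Mathlib
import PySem

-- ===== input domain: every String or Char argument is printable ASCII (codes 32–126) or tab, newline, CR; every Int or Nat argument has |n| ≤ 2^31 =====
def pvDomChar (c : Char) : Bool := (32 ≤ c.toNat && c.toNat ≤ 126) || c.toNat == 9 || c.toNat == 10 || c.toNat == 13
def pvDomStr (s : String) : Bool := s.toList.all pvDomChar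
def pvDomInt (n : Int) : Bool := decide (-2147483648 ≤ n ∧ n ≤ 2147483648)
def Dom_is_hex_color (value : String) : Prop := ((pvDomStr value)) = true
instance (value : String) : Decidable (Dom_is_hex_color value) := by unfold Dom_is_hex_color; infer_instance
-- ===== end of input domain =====

-- B replaces A's explicit length guard, prefix check and per-character membership
-- loop by a single full-string pattern match (a compiled regex in Python).

-- ===== PORT A =====
-- the list 'valid' of one-character strings, as the characters they hold
def pvValidA : List Char :=
  ['0','1','2','3','4','5','6','7','8','9','a','b','c','d','e','f']

-- 'for v in value[1:]: if not (v in valid): return False' followed by 'return True'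
def pvLoopA : List Char → Bool
  | [] => true
  | v :: rest => if ¬ (v ∈ pvValidA) then false else pvLoopA rest

def is_hex_color (value : String) : Bool :=
  if PySem.Str.len value ≠ 7 then false
  else if PySem.Str.pyGet? value 0 ≠ some '#' then false
  else pvLoopA (PySem.Str.slice value (some 1) none).toList

-- ===== PORT B =====
-- transliteration of bool(re.fullmatch(r"#[0-9a-f]{6}", value)): a leading '#',
-- then exactly six characters of the class [0-9a-f]
def pvHexClass (c : Char) : Bool := ('0' ≤ c && c ≤ '9') || ('a' ≤ c && c ≤ 'f')

def is_hex_color_alt (value : String) : Bool :=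
  match value.toList with
  | '#' :: rest => rest.length == 6 && rest.all pvHexClass
  | _ => false

-- ===== PRECONDITION & SPEC =====
def Spec_is_hex_color (value : String) (out : Bool) : Prop := out = is_hex_color_alt value
instance (value : String) (out : Bool) : Decidable (Spec_is_hex_color value out) := by unfold Spec_is_hex_color; infer_instance

-- ===== CLAIM (what is proved, stated in full; the proofs are below) =====
def Claim_equal_is_hex_color : Prop := ∀ (value : String), Dom_is_hex_color value → Spec_is_hex_color value (is_hex_color value)

-- ===== LEMMAS AND PROOFS =====

-- membership in A's 16-element list is exactly B's character class
lemma mem_valid_iff_hexClass (c : Char) : (c ∈ pvValidA) ↔ pvHexClass c = true := by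
  simp only [pvValidA, pvHexClass, List.mem_cons, List.not_mem_nil, or_false,
    Bool.or_eq_true, Bool.and_eq_true, decide_eq_true_eq, Char.le_def, Char.ext_iff,
    ← UInt32.toNat_inj, UInt32.le_iff_toNat_le]
  constructor
  · rintro (h|h|h|h|h|h|h|h|h|h|h|h|h|h|h|h) <;> rw [h] <;> decide
  · intro hh
    have hc48 : ('0'.val).toNat = 48 := by decide
    have hc49 : ('1'.val).toNat = 49 := by decide
    have hc50 : ('2'.val).toNat = 50 := by decide
    have hc51 : ('3'.val).toNat = 51 := by decide
    have hc52 : ('4'.val).toNat = 52 := by decide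
    have hc53 : ('5'.val).toNat = 53 := by decide
    have hc54 : ('6'.val).toNat = 54 := by decide
    have hc55 : ('7'.val).toNat = 55 := by decide
    have hc56 : ('8'.val).toNat = 56 := by decide
    have hc57 : ('9'.val).toNat = 57 := by decide
    have hc97 : ('a'.val).toNat = 97 := by decide
    have hc98 : ('b'.val).toNat = 98 := by decide
    have hc99 : ('c'.val).toNat = 99 := by decide
    have hc100 : ('d'.val).toNat = 100 := by decide
    have hc101 : ('e'.val).toNat = 101 := by decide
    have hc102 : ('f'.val).toNat = 102 := by decide
    simp only [hc48, hc49, hc50, hc51, hc52, hc53, hc54, hc55, hc56, hc57,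
      hc97, hc98, hc99, hc100, hc101, hc102] at hh ⊢
    omega

-- A's early-return loop computes List.all of B's character class
lemma loopA_eq_all (l : List Char) : pvLoopA l = l.all pvHexClass := by
  induction l with
  | nil => rfl
  | cons v rest ih =>
    by_cases h : v ∈ pvValidA
    · simp [pvLoopA, h, ih, (mem_valid_iff_hexClass v).1 h]
    · have hf : pvHexClass v = false := by
        cases hb : pvHexClass v
        · rfl
        · exact absurd ((mem_valid_iff_hexClass v).2 hb) h
      simp [pvLoopA, h, hf]

-- ===== VERDICT (by name: the statement is the Claim_ definition above) =====
theorem is_hex_color_spec : Claim_equal_is_hex_color := by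
  intro value _
  unfold Spec_is_hex_color is_hex_color is_hex_color_alt
  simp only [PySem.Str.len_eq, PySem.Str.pyGet?, PySem.Str.slice, PySem.Chars.slice,
    String.toList_ofList, PySem.List.slice_from_one, loopA_eq_all]
  generalize value.toList = l
  cases l with
  | nil => simp [PySem.Chars.pyGet?]
  | cons c rest =>
    by_cases hc : c = '#'
    · subst hc
      by_cases h6 : rest.length = 6
      · simp [PySem.Chars.pyGet?, h6]
      · have h7 : ((rest.length : Int) + 1 ≠ 7) := by omega
        simp [h7, h6]
    · simp [PySem.Chars.pyGet?, hc]
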